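-- pv_equiv track=rewrite | github.com/parthnagar8882-lang/InsightHR-Resume-Analyzer | resumeiq/analyzer.py | _sum_unique_months
-- ===== SOURCE A (Python) =====
-- def _sum_unique_months(ranges: list[tuple[int, int]]) -> int:
--     if not ranges:
--         return 0
--
--     normalized = sorted((min(start, end), max(start, end)) for start, end in ranges)
--     merged = [normalized[0]]
--
--     for start, end in normalized[1:]:
--         last_start, last_end = merged[-1]
--         if start <= last_end + 1:
--             merged[-1] = (last_start, max(last_end, end))
--         else:
--             merged.append((start, end))
--
--     return sum((end - start) + 1 for start, end in merged)
-- ===== SOURCE B (Python) =====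
-- def _sum_unique_months(ranges: list[tuple[int, int]]) -> int:
--     # Sweep line over boundary events instead of merging intervals:
--     # +1 where coverage begins, -1 just past where it ends; scanning the
--     # sorted events, the stretch since the previous event is counted
--     # whenever at least one interval is active.
--     events = []
--     for start, end in ranges:
--         lo, hi = min(start, end), max(start, end)
--         events.append((lo, 1))
--         events.append((hi + 1, -1))
--     events.sort()
--     total = 0
--     active = 0
--     prev = 0
--     for x, delta in events:
--         if active > 0:
--             total += x - prev
--         prev = x
--         active += delta
--     return total
-- ===== Notes on version B (the rewrite author's own statement) =====
-- stated objective: alternative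
-- what changed: B replaces A's sort-and-merge of intervals by a boundary-event sweep line: each range emits a +1 event at its low end and a -1 event just past its high end, and one scan of the sorted events adds the gap since the previous event whenever the active-interval counter is positive; no merged-interval list or adjacency test exists in B.
import Mathlib
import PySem

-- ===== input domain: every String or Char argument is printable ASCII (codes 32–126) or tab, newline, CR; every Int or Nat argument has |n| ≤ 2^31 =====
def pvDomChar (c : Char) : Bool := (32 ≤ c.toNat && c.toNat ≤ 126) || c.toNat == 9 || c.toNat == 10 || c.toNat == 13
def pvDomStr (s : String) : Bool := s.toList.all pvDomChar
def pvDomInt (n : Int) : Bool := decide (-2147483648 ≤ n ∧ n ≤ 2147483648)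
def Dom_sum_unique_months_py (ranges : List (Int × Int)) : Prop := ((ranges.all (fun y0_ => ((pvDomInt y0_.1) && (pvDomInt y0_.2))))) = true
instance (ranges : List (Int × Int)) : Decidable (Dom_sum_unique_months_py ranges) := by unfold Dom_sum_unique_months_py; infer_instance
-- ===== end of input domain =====

-- B replaces A's sort-and-merge of intervals by a boundary-event sweep line (+1 at each
-- low end, -1 just past each high end; count gaps while the active counter is positive);
-- objective: alternative algorithm of the same cost.

-- ===== PORT A =====
-- Python's merged list is kept REVERSED (head = Python's merged[-1]); the final sum of
-- (end - start + 1) over it is order-independent (Int addition is commutative), so the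
-- returned value is exactly Python's.
def sum_unique_months_py (ranges : List (Int × Int)) : Int :=
  if ranges = [] then 0
  else
    match PySem.List.sorted2 (ranges.map (fun p => (min p.1 p.2, max p.1 p.2)))
            (fun p => p.1) (fun p => p.2) with
    | [] => 0  -- unreachable: ranges ≠ []
    | first :: rest =>
      let mergedRev := rest.foldl (fun (m : List (Int × Int)) (p : Int × Int) =>
        match m with
        | [] => [p]  -- unreachable: the accumulator is never empty
        | (ls, le) :: ms =>
          if p.1 ≤ le + 1 then (ls, max le p.2) :: ms
          else p :: (ls, le) :: ms) [first]
      mergedRev.foldl (fun acc q => acc + (q.2 - q.1 + 1)) 0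

-- ===== PORT B =====
def sum_unique_months_py_alt (ranges : List (Int × Int)) : Int :=
  let events := ranges.foldl (fun (acc : List (Int × Int)) p =>
    acc ++ [(min p.1 p.2, (1 : Int)), (max p.1 p.2 + 1, (-1 : Int))]) []
  let sortedEvents := PySem.List.sorted2 events (fun e => e.1) (fun e => e.2)
  (sortedEvents.foldl (fun (st : Int × Int × Int) e =>
      (st.1 + (if 0 < st.2.1 then e.1 - st.2.2 else 0), st.2.1 + e.2, e.1))
    ((0 : Int), (0 : Int), (0 : Int))).1

-- ===== PRECONDITION & SPEC =====
def Spec_sum_unique_months_py (ranges : List (Int × Int)) (out : Int) : Prop := out = sum_unique_months_py_alt ranges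
instance (ranges : List (Int × Int)) (out : Int) : Decidable (Spec_sum_unique_months_py ranges out) := by unfold Spec_sum_unique_months_py; infer_instance

-- ===== CLAIM (what is proved, stated in full; the proofs are below) =====
def Claim_equal_sum_unique_months_py : Prop := ∀ (ranges : List (Int × Int)), Dom_sum_unique_months_py ranges → Spec_sum_unique_months_py ranges (sum_unique_months_py ranges)

-- ===== LEMMAS AND PROOFS =====

-- A's merge step (on the reversed merged list), the running-max scan step it is reduced
-- to, and B's sweep step, named for the proofs.
def pvStepA (m : List (Int × Int)) (p : Int × Int) : List (Int × Int) :=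
  match m with
  | [] => [p]
  | (ls, le) :: ms =>
    if p.1 ≤ le + 1 then (ls, max le p.2) :: ms
    else p :: (ls, le) :: ms

def pvStepB (st : Int × Option Int) (p : Int × Int) : Int × Option Int :=
  match st.2 with
  | none => (st.1 + (p.2 - p.1 + 1), some p.2)
  | some hi =>
    if hi + 1 < p.1 then (st.1 + (p.2 - p.1 + 1), some p.2)
    else if hi < p.2 then (st.1 + (p.2 - hi), some p.2)
    else st

def pvSweep (st : Int × Int × Int) (e : Int × Int) : Int × Int × Int :=
  (st.1 + (if 0 < st.2.1 then e.1 - st.2.2 else 0), st.2.1 + e.2, e.1)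

def pvSumLen (m : List (Int × Int)) : Int := (m.map (fun q => q.2 - q.1 + 1)).sum

-- the set of months covered by a list of (lo, hi) intervals (proof-side only)
noncomputable def pvU (l : List (Int × Int)) : Finset Int :=
  l.foldr (fun q acc => Finset.Icc q.1 q.2 ∪ acc) ∅

-- number of intervals of `es`'s kind whose coordinate is ≤ x, weighted by deltas
def pvCnt (es : List (Int × Int)) (x : Int) : Int :=
  (es.map (fun e => if e.1 ≤ x then e.2 else 0)).sum

def pvEvt (p : Int × Int) : List (Int × Int) :=
  [(min p.1 p.2, (1 : Int)), (max p.1 p.2 + 1, (-1 : Int))]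

lemma pvU_nil : pvU [] = ∅ := rfl
lemma pvU_cons (q : Int × Int) (l : List (Int × Int)) :
    pvU (q :: l) = Finset.Icc q.1 q.2 ∪ pvU l := rfl

lemma mem_pvU (l : List (Int × Int)) (x : Int) :
    x ∈ pvU l ↔ ∃ q ∈ l, q.1 ≤ x ∧ x ≤ q.2 := by
  induction l with
  | nil => simp [pvU_nil]
  | cons q l ih => simp [pvU_cons, ih, Finset.mem_Icc]

lemma pvU_perm {l1 l2 : List (Int × Int)} (h : l1.Perm l2) : pvU l1 = pvU l2 := by
  ext x; simp only [mem_pvU]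
  constructor <;> rintro ⟨q, hq, h1, h2⟩
  · exact ⟨q, h.mem_iff.mp hq, h1, h2⟩
  · exact ⟨q, h.mem_iff.mpr hq, h1, h2⟩

lemma pvSumLen_foldl (m : List (Int × Int)) :
    m.foldl (fun acc q => acc + (q.2 - q.1 + 1)) 0 = pvSumLen m := by
  rw [PySem.List.foldl_add]; simp [pvSumLen]

-- Core A-side invariant: over ANY tail t, the scan state tracks A's merge state — the
-- scan accumulator lags the total length of A's merged list by a constant, and the
-- scan's `hi` is the end of A's last block.
lemma pv_key (t : List (Int × Int)) : ∀ (s0 e0 : Int) (ms : List (Int × Int)) (acc : Int),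
    ∃ s1 e1 ms1,
      t.foldl pvStepA ((s0, e0) :: ms) = (s1, e1) :: ms1 ∧
      t.foldl pvStepB (acc, some e0)
        = (acc + pvSumLen ((s1, e1) :: ms1) - pvSumLen ((s0, e0) :: ms), some e1) := by
  induction t with
  | nil =>
    intro s0 e0 ms acc
    exact ⟨s0, e0, ms, rfl, by simp⟩
  | cons p t ih =>
    intro s0 e0 ms acc
    obtain ⟨p1, p2⟩ := p
    simp only [List.foldl_cons]
    by_cases h1 : p1 ≤ e0 + 1
    · by_cases h2 : e0 < p2
      · have hA : pvStepA ((s0, e0) :: ms) (p1, p2) = (s0, p2) :: ms := by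
          simp [pvStepA, h1, max_eq_right (le_of_lt h2)]
        have hB : pvStepB (acc, some e0) (p1, p2) = (acc + (p2 - e0), some p2) := by
          simp only [pvStepB]
          split_ifs <;> first | rfl | (exfalso; omega)
        rw [hA, hB]
        obtain ⟨s1, e1, ms1, hA', hB'⟩ := ih s0 p2 ms (acc + (p2 - e0))
        refine ⟨s1, e1, ms1, hA', ?_⟩
        rw [hB']
        have : pvSumLen ((s0, p2) :: ms) = pvSumLen ((s0, e0) :: ms) + (p2 - e0) := by
          simp [pvSumLen]
          ring
        rw [this]; ring_nf
      · have hA : pvStepA ((s0, e0) :: ms) (p1, p2) = (s0, e0) :: ms := by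
          simp [pvStepA, h1, max_eq_left (le_of_not_gt h2)]
        have hB : pvStepB (acc, some e0) (p1, p2) = (acc, some e0) := by
          simp only [pvStepB]
          split_ifs <;> first | rfl | (exfalso; omega)
        rw [hA, hB]
        exact ih s0 e0 ms acc
    · have hA : pvStepA ((s0, e0) :: ms) (p1, p2) = (p1, p2) :: (s0, e0) :: ms := by
        simp [pvStepA, h1]
      have hB : pvStepB (acc, some e0) (p1, p2) = (acc + (p2 - p1 + 1), some p2) := by
        simp only [pvStepB]
        split_ifs <;> first | rfl | (exfalso; omega)
      rw [hA, hB]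
      obtain ⟨s1, e1, ms1, hA', hB'⟩ := ih p1 p2 ((s0, e0) :: ms) (acc + (p2 - p1 + 1))
      refine ⟨s1, e1, ms1, hA', ?_⟩
      rw [hB']
      have : pvSumLen ((p1, p2) :: (s0, e0) :: ms)
          = pvSumLen ((s0, e0) :: ms) + (p2 - p1 + 1) := by
        simp [pvSumLen]
        ring
      rw [this]; ring_nf

-- inserting with sorted2's lexicographic comparator keeps the list sorted by fst
lemma pv_insertBy_pairwise_fst (x : Int × Int) (ys : List (Int × Int))
    (h : ys.Pairwise (fun a b => a.1 ≤ b.1)) :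
    (PySem.List.insertBy
        (fun a b => decide (a.1 < b.1) || !decide (b.1 < a.1) && decide (a.2 < b.2))
        x ys).Pairwise (fun (a b : Int × Int) => a.1 ≤ b.1) := by
  induction ys with
  | nil => simp [PySem.List.insertBy]
  | cons y ys ih =>
    rw [List.pairwise_cons] at h
    by_cases hb : (decide (x.1 < y.1) || !decide (y.1 < x.1) && decide (x.2 < y.2)) = true
    · have hxy : x.1 ≤ y.1 := by
        simp only [Bool.or_eq_true, Bool.and_eq_true, Bool.not_eq_true',
          decide_eq_true_eq, decide_eq_false_iff_not] at hb
        omega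
      have : PySem.List.insertBy
          (fun a b => decide (a.1 < b.1) || !decide (b.1 < a.1) && decide (a.2 < b.2))
          x (y :: ys) = x :: y :: ys := by
        simp [PySem.List.insertBy, hb]
      rw [this]
      refine List.Pairwise.cons ?_ (List.pairwise_cons.mpr h)
      intro z hz
      rcases List.mem_cons.mp hz with rfl | hz
      · exact hxy
      · exact le_trans hxy (h.1 z hz)
    · have hyx : y.1 ≤ x.1 := by
        simp only [Bool.or_eq_true, Bool.and_eq_true, Bool.not_eq_true',
          decide_eq_true_eq, decide_eq_false_iff_not, not_or, not_and] at hb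
        omega
      have : PySem.List.insertBy
          (fun a b => decide (a.1 < b.1) || !decide (b.1 < a.1) && decide (a.2 < b.2))
          x (y :: ys)
          = y :: PySem.List.insertBy
              (fun a b => decide (a.1 < b.1) || !decide (b.1 < a.1) && decide (a.2 < b.2))
              x ys := by
        simp [PySem.List.insertBy, hb]
      rw [this]
      refine List.Pairwise.cons ?_ (ih h.2)
      intro z hz
      rcases (PySem.List.insertBy_mem_iff _ _ _ _).mp hz with rfl | hz
      · exact hyx
      · exact h.1 z hz

lemma pv_sorted2_pairwise_fst (xs : List (Int × Int)) :
    (PySem.List.sorted2 xs (fun p => p.1) (fun p => p.2)).Pairwise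
      (fun (a b : Int × Int) => a.1 ≤ b.1) := by
  show (xs.foldl (fun acc x => PySem.List.insertBy
      (fun a b => decide (a.1 < b.1) || !decide (b.1 < a.1) && decide (a.2 < b.2)) x acc)
      []).Pairwise _
  have key : ∀ (l : List (Int × Int)) (acc : List (Int × Int)),
      acc.Pairwise (fun (a b : Int × Int) => a.1 ≤ b.1) →
      (l.foldl (fun acc x => PySem.List.insertBy
        (fun a b => decide (a.1 < b.1) || !decide (b.1 < a.1) && decide (a.2 < b.2)) x acc)
        acc).Pairwise (fun (a b : Int × Int) => a.1 ≤ b.1) := by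
    intro l
    induction l with
    | nil => intro acc h; exact h
    | cons x l ih =>
      intro acc h
      exact ih _ (pv_insertBy_pairwise_fst x acc h)
  exact key xs [] List.Pairwise.nil

-- A's scan computes the cardinality of the union: invariant over the sorted tail
lemma pv_scan_card (t : List (Int × Int)) : ∀ (hi lstar : Int) (S : Finset Int),
    (∀ q ∈ t, lstar ≤ q.1 ∧ q.1 ≤ q.2) →
    t.Pairwise (fun (a b : Int × Int) => a.1 ≤ b.1) →
    (∀ x ∈ S, x ≤ hi) → Finset.Icc lstar hi ⊆ S →
    (t.foldl pvStepB ((S.card : Int), some hi)).1 = ((S ∪ pvU t).card : Int) := by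
  induction t with
  | nil => intro hi lstar S _ _ _ _; simp [pvU_nil]
  | cons p t ih =>
    intro hi lstar S hq hpw hS hsub
    obtain ⟨p1, p2⟩ := p
    have hp : lstar ≤ p1 ∧ p1 ≤ p2 := hq _ (List.mem_cons_self ..)
    rw [List.pairwise_cons] at hpw
    simp only [List.foldl_cons]
    by_cases h1 : hi + 1 < p1
    · have hstep : pvStepB ((S.card : Int), some hi) (p1, p2)
          = ((S.card : Int) + (p2 - p1 + 1), some p2) := by
        simp only [pvStepB]; split_ifs <;> first | rfl | (exfalso; omega)
      have hdisj : Disjoint S (Finset.Icc p1 p2) := by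
        rw [Finset.disjoint_left]
        intro x hx hx'
        rw [Finset.mem_Icc] at hx'
        have := hS x hx; omega
      have hcard : ((S ∪ Finset.Icc p1 p2).card : Int) = (S.card : Int) + (p2 - p1 + 1) := by
        rw [Finset.card_union_of_disjoint hdisj, Int.card_Icc]
        push_cast [Int.toNat_of_nonneg (by omega : (0:Int) ≤ p2 + 1 - p1)]
        ring
      rw [hstep, ← hcard]
      have := ih p2 p1 (S ∪ Finset.Icc p1 p2)
        (fun q hqt => ⟨(hpw.1 q hqt), (hq q (List.mem_cons_of_mem _ hqt)).2⟩)
        hpw.2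
        (by intro x hx
            rcases Finset.mem_union.mp hx with hx | hx
            · have := hS x hx; omega
            · exact (Finset.mem_Icc.mp hx).2)
        (Finset.subset_union_right)
      rw [this, pvU_cons, Finset.union_assoc]
    · by_cases h2 : hi < p2
      · have hstep : pvStepB ((S.card : Int), some hi) (p1, p2)
            = ((S.card : Int) + (p2 - hi), some p2) := by
          simp only [pvStepB]; split_ifs <;> first | rfl | (exfalso; omega)
        have hunion : S ∪ Finset.Icc p1 p2 = S ∪ Finset.Ioc hi p2 := by
          ext x
          simp only [Finset.mem_union, Finset.mem_Icc, Finset.mem_Ioc]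
          constructor
          · rintro (hx | ⟨ha, hb⟩)
            · exact Or.inl hx
            · by_cases hx : hi < x
              · exact Or.inr ⟨hx, hb⟩
              · exact Or.inl (hsub (Finset.mem_Icc.mpr ⟨by omega, by omega⟩))
          · rintro (hx | ⟨ha, hb⟩)
            · exact Or.inl hx
            · exact Or.inr ⟨by omega, hb⟩
        have hdisj : Disjoint S (Finset.Ioc hi p2) := by
          rw [Finset.disjoint_left]
          intro x hx hx'
          rw [Finset.mem_Ioc] at hx'
          have := hS x hx; omega
        have hcard : ((S ∪ Finset.Icc p1 p2).card : Int) = (S.card : Int) + (p2 - hi) := by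
          rw [hunion, Finset.card_union_of_disjoint hdisj, Int.card_Ioc]
          push_cast [Int.toNat_of_nonneg (by omega : (0:Int) ≤ p2 - hi)]
          ring
        rw [hstep, ← hcard]
        have := ih p2 lstar (S ∪ Finset.Icc p1 p2)
          (fun q hqt => ⟨(hq q (List.mem_cons_of_mem _ hqt)).1,
                         (hq q (List.mem_cons_of_mem _ hqt)).2⟩)
          hpw.2
          (by intro x hx
              rcases Finset.mem_union.mp hx with hx | hx
              · have := hS x hx; omega
              · exact (Finset.mem_Icc.mp hx).2)
          (by intro x hx
              rw [Finset.mem_Icc] at hx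
              by_cases hxh : x ≤ hi
              · exact Finset.mem_union_left _ (hsub (Finset.mem_Icc.mpr ⟨hx.1, hxh⟩))
              · exact Finset.mem_union_right _ (Finset.mem_Icc.mpr ⟨by omega, hx.2⟩))
        rw [this, pvU_cons, Finset.union_assoc]
      · have hstep : pvStepB ((S.card : Int), some hi) (p1, p2)
            = ((S.card : Int), some hi) := by
          simp only [pvStepB]; split_ifs <;> first | rfl | (exfalso; omega)
        have habs : S ∪ pvU ((p1, p2) :: t) = S ∪ pvU t := by
          rw [pvU_cons, ← Finset.union_assoc]
          congr 1
          apply Finset.union_eq_left.mpr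
          intro x hx
          rw [Finset.mem_Icc] at hx
          exact hsub (Finset.mem_Icc.mpr ⟨by omega, by omega⟩)
        rw [hstep, habs]
        exact ih hi lstar S (fun q hqt => hq q (List.mem_cons_of_mem _ hqt)) hpw.2 hS hsub

-- A equals the cardinality of the union of its (normalized) intervals
set_option maxHeartbeats 1000000 in
lemma pv_A_card (ranges : List (Int × Int)) :
    sum_unique_months_py ranges
      = ((pvU (ranges.map (fun p => (min p.1 p.2, max p.1 p.2)))).card : Int) := by
  unfold sum_unique_months_py
  by_cases hr : ranges = []
  · subst hr; simp [pvU_nil]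
  · simp only [hr, if_false]
    have hperm := PySem.List.sorted2_perm (ranges.map (fun p => (min p.1 p.2, max p.1 p.2)))
      (fun p => p.1) (fun p => p.2) false
    cases hL : PySem.List.sorted2 (ranges.map (fun p => (min p.1 p.2, max p.1 p.2)))
        (fun p => p.1) (fun p => p.2) with
    | nil =>
      rw [hL] at hperm
      have := hperm.symm.eq_nil
      cases ranges with
      | nil => exact absurd rfl hr
      | cons a l => simp at this
    | cons first rest =>
      obtain ⟨s0, e0⟩ := first
      rw [hL] at hperm
      have hpw := pv_sorted2_pairwise_fst (ranges.map (fun p => (min p.1 p.2, max p.1 p.2)))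
      rw [hL, List.pairwise_cons] at hpw
      have hmemnorm : ∀ q ∈ (s0, e0) :: rest, q.1 ≤ q.2 := by
        intro q hq
        have : q ∈ ranges.map (fun p => (min p.1 p.2, max p.1 p.2)) := hperm.mem_iff.mp hq
        obtain ⟨p, _, rfl⟩ := List.mem_map.mp this
        exact min_le_max
      have hs0e0 : s0 ≤ e0 := hmemnorm _ (List.mem_cons_self ..)
      show (rest.foldl pvStepA [(s0, e0)]).foldl (fun acc q => acc + (q.2 - q.1 + 1)) 0
          = ((pvU (ranges.map (fun p => (min p.1 p.2, max p.1 p.2)))).card : Int)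
      obtain ⟨s1, e1, ms1, hA', hB'⟩ := pv_key rest s0 e0 [] (e0 - s0 + 1)
      rw [hA', pvSumLen_foldl]
      have hval : pvSumLen ((s1, e1) :: ms1) = (rest.foldl pvStepB (e0 - s0 + 1, some e0)).1 := by
        rw [hB']; simp [pvSumLen]
      rw [hval]
      have hcard0 : ((Finset.Icc s0 e0).card : Int) = e0 - s0 + 1 := by
        rw [Int.card_Icc]
        push_cast [Int.toNat_of_nonneg (by omega : (0:Int) ≤ e0 + 1 - s0)]
        ring
      rw [← hcard0]
      rw [pv_scan_card rest e0 s0 (Finset.Icc s0 e0)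
        (fun q hqt => ⟨hpw.1 q hqt, hmemnorm q (List.mem_cons_of_mem _ hqt)⟩)
        hpw.2
        (fun x hx => (Finset.mem_Icc.mp hx).2)
        (Finset.Subset.refl _)]
      have : Finset.Icc s0 e0 ∪ pvU rest = pvU ((s0, e0) :: rest) := (pvU_cons (s0, e0) rest).symm
      rw [this, pvU_perm hperm]

-- the per-interval events contribute the coverage indicator to pvCnt
lemma pv_cnt_events (ranges : List (Int × Int)) (x : Int) :
    pvCnt (ranges.flatMap pvEvt) x
      = ((ranges.countP (fun p => decide (min p.1 p.2 ≤ x ∧ x ≤ max p.1 p.2))) : Int) := by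
  induction ranges with
  | nil => simp [pvCnt]
  | cons p l ih =>
    rw [List.flatMap_cons]
    simp only [pvCnt, List.map_append, List.sum_append] at ih ⊢
    rw [ih, List.countP_cons]
    have hmm : min p.1 p.2 ≤ max p.1 p.2 := min_le_max
    simp only [pvEvt, List.map_cons, List.map_nil, List.sum_cons, List.sum_nil]
    push_cast
    simp only [decide_eq_true_eq]
    split_ifs <;> omega

lemma pv_sum_deltas (ranges : List (Int × Int)) :
    ((ranges.flatMap pvEvt).map (fun e => e.2)).sum = 0 := by
  induction ranges with
  | nil => simp
  | cons p l ih => simp [List.flatMap_cons, pvEvt, ih]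

lemma pv_cnt_perm {es1 es2 : List (Int × Int)} (h : es1.Perm es2) (x : Int) :
    pvCnt es1 x = pvCnt es2 x := by
  unfold pvCnt
  exact (h.map _).sum_eq

lemma pv_cnt_zero (es : List (Int × Int)) (x : Int) (h : ∀ e ∈ es, x < e.1) :
    pvCnt es x = 0 := by
  unfold pvCnt
  apply List.sum_eq_zero
  intro y hy
  obtain ⟨e, he, rfl⟩ := List.mem_map.mp hy
  have := h e he
  simp [show ¬ e.1 ≤ x by omega]

-- B's sweep computes the number of points of [prev, M) where the running delta-count is positive
lemma pv_sweep_card (es : List (Int × Int)) : ∀ (total active prev M : Int),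
    es.Pairwise (fun (a b : Int × Int) => a.1 ≤ b.1) →
    (∀ e ∈ es, prev ≤ e.1 ∧ e.1 ≤ M) →
    active + (es.map (fun e => e.2)).sum = 0 →
    prev ≤ M →
    (es.foldl pvSweep (total, active, prev)).1
      = total + ((((Finset.Ico prev M).filter (fun x => 0 < active + pvCnt es x))).card : Int) := by
  induction es with
  | nil =>
    intro total active prev M _ _ hzero _
    simp only [List.map_nil, List.sum_nil, add_zero] at hzero
    subst hzero
    simp [pvCnt]
  | cons e t ih =>
    intro total active prev M hpw hmem hzero hpm
    obtain ⟨c, d⟩ := e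
    have hc : prev ≤ c ∧ c ≤ M := hmem _ (List.mem_cons_self ..)
    rw [List.pairwise_cons] at hpw
    simp only [List.foldl_cons]
    have hstep : pvSweep (total, active, prev) (c, d)
        = (total + (if 0 < active then c - prev else 0), active + d, c) := rfl
    rw [hstep]
    rw [ih (total + (if 0 < active then c - prev else 0)) (active + d) c M hpw.2
      (fun e' he' => ⟨hpw.1 e' he', (hmem e' (List.mem_cons_of_mem _ he')).2⟩)
      (by simp only [List.map_cons, List.sum_cons] at hzero ⊢; omega)
      hc.2]
    -- split the window at c
    have hsplit : Finset.Ico prev M = Finset.Ico prev c ∪ Finset.Ico c M :=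
      (Finset.Ico_union_Ico_eq_Ico hc.1 hc.2).symm
    have hdisj : Disjoint ((Finset.Ico prev c).filter (fun x => 0 < active + pvCnt ((c, d) :: t) x))
        ((Finset.Ico c M).filter (fun x => 0 < active + pvCnt ((c, d) :: t) x)) :=
      Finset.disjoint_filter_filter (Finset.Ico_disjoint_Ico_consecutive prev c M)
    rw [hsplit, Finset.filter_union, Finset.card_union_of_disjoint hdisj]
    -- the low part: count is zero there, the filter is decided by `active` alone
    have hlow : ((Finset.Ico prev c).filter (fun x => 0 < active + pvCnt ((c, d) :: t) x))
        = if 0 < active then Finset.Ico prev c else ∅ := by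
      split_ifs with ha
      · apply Finset.filter_true_of_mem
        intro x hx
        rw [Finset.mem_Ico] at hx
        have hz : pvCnt ((c, d) :: t) x = 0 := by
          apply pv_cnt_zero
          intro e' he'
          rcases List.mem_cons.mp he' with rfl | he'
          · exact hx.2
          · exact lt_of_lt_of_le hx.2 (hpw.1 e' he')
        omega
      · apply Finset.filter_false_of_mem
        intro x hx
        rw [Finset.mem_Ico] at hx
        have hz : pvCnt ((c, d) :: t) x = 0 := by
          apply pv_cnt_zero
          intro e' he'
          rcases List.mem_cons.mp he' with rfl | he'
          · exact hx.2
          · exact lt_of_lt_of_le hx.2 (hpw.1 e' he')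
        omega
    -- the high part: the head event is counted, matching the recursive state
    have hhigh : ((Finset.Ico c M).filter (fun x => 0 < active + pvCnt ((c, d) :: t) x))
        = ((Finset.Ico c M).filter (fun x => 0 < (active + d) + pvCnt t x)) := by
      apply Finset.filter_congr
      intro x hx
      rw [Finset.mem_Ico] at hx
      have : pvCnt ((c, d) :: t) x = d + pvCnt t x := by
        unfold pvCnt
        simp [show c ≤ x by omega]
      rw [this]
      omega
    rw [hlow, hhigh]
    split_ifs with ha
    · rw [Int.card_Ico]
      push_cast [Int.toNat_of_nonneg (by omega : (0:Int) ≤ c - prev)]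
      ring
    · simp

-- B equals the cardinality of the union of the (normalized) intervals
lemma pv_B_card (ranges : List (Int × Int)) :
    sum_unique_months_py_alt ranges
      = ((pvU (ranges.map (fun p => (min p.1 p.2, max p.1 p.2)))).card : Int) := by
  show ((PySem.List.sorted2
      (ranges.foldl (fun (acc : List (Int × Int)) p =>
        acc ++ [(min p.1 p.2, (1 : Int)), (max p.1 p.2 + 1, (-1 : Int))]) [])
      (fun e => e.1) (fun e => e.2)).foldl
      (fun (st : Int × Int × Int) e =>
        (st.1 + (if 0 < st.2.1 then e.1 - st.2.2 else 0), st.2.1 + e.2, e.1))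
      ((0 : Int), (0 : Int), (0 : Int))).1 = _
  rw [PySem.List.foldl_append_eq_flatMap]
  simp only [List.nil_append]
  have hflat : ranges.flatMap (fun p => [(min p.1 p.2, (1 : Int)), (max p.1 p.2 + 1, (-1 : Int))])
      = ranges.flatMap pvEvt := rfl
  rw [hflat]
  have hperm := PySem.List.sorted2_perm (ranges.flatMap pvEvt) (fun e => e.1) (fun e => e.2) false
  cases hL : PySem.List.sorted2 (ranges.flatMap pvEvt) (fun e => e.1) (fun e => e.2) with
  | nil =>
    rw [hL] at hperm
    have hE : ranges.flatMap pvEvt = [] := hperm.symm.eq_nil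
    cases ranges with
    | nil => simp [pvU_nil]
    | cons p l => simp [List.flatMap_cons, pvEvt] at hE
  | cons e0 rest =>
    obtain ⟨c0, d0⟩ := e0
    rw [hL] at hperm
    have hpw := pv_sorted2_pairwise_fst (ranges.flatMap pvEvt)
    rw [show PySem.List.sorted2 (ranges.flatMap pvEvt) (fun p => p.1) (fun p => p.2)
        = (c0, d0) :: rest from hL, List.pairwise_cons] at hpw
    simp only [List.foldl_cons]
    have hstep0 : pvSweep ((0 : Int), (0 : Int), (0 : Int)) (c0, d0) = (0, d0, c0) := by
      simp [pvSweep]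
    show (rest.foldl pvSweep (pvSweep (0, 0, 0) (c0, d0))).1 = _
    rw [hstep0]
    -- bound M: one past a running max of all event coordinates
    set M := ((ranges.flatMap pvEvt).map (fun e => e.1)).foldl max c0 with hM
    have hMmax := PySem.List.le_foldl_max (((ranges.flatMap pvEvt)).map (fun e => e.1)) c0
    have hcM : c0 ≤ M := hMmax.1
    have hcoordM : ∀ e ∈ ranges.flatMap pvEvt, e.1 ≤ M := by
      intro e he
      exact hMmax.2 e.1 (List.mem_map.mpr ⟨e, he, rfl⟩)
    rw [pv_sweep_card rest 0 d0 c0 M hpw.2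
      (fun e' he' => ⟨hpw.1 e' he',
        hcoordM e' (hperm.mem_iff.mp (List.mem_cons_of_mem _ he'))⟩)
      (by have hs : (((c0, d0) :: rest).map (fun e => e.2)).sum
              = ((ranges.flatMap pvEvt).map (fun e => e.2)).sum := (hperm.map _).sum_eq
          rw [pv_sum_deltas] at hs
          simp only [List.map_cons, List.sum_cons] at hs
          omega)
      hcM]
    rw [zero_add]
    congr 1
    -- the filtered window IS the union of the normalized intervals
    have hsetEq : ((Finset.Ico c0 M).filter (fun x => 0 < d0 + pvCnt rest x))
        = pvU (ranges.map (fun p => (min p.1 p.2, max p.1 p.2))) := by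
      ext x
      simp only [Finset.mem_filter, Finset.mem_Ico, mem_pvU]
      constructor
      · rintro ⟨⟨hx1, hx2⟩, hpos⟩
        have hcnt : d0 + pvCnt rest x = pvCnt ((c0, d0) :: rest) x := by
          unfold pvCnt
          simp [show c0 ≤ x by omega]
        rw [hcnt, pv_cnt_perm hperm, pv_cnt_events] at hpos
        have : 0 < ranges.countP (fun p => decide (min p.1 p.2 ≤ x ∧ x ≤ max p.1 p.2)) := by
          exact_mod_cast hpos
        obtain ⟨p, hp, hcov⟩ := List.countP_pos_iff.mp this
        exact ⟨(min p.1 p.2, max p.1 p.2), List.mem_map.mpr ⟨p, hp, rfl⟩,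
          (of_decide_eq_true hcov).1, (of_decide_eq_true hcov).2⟩
      · rintro ⟨q, hq, hq1, hq2⟩
        obtain ⟨p, hp, rfl⟩ := List.mem_map.mp hq
        -- c0 ≤ x : the +1 event of p is in the sorted list, whose head coordinate is minimal
        have hplus : (min p.1 p.2, (1 : Int)) ∈ ranges.flatMap pvEvt := by
          rw [List.mem_flatMap]
          exact ⟨p, hp, by simp [pvEvt]⟩
        have hc0le : c0 ≤ min p.1 p.2 := by
          rcases List.mem_cons.mp (hperm.mem_iff.mpr hplus) with heq | hmem
          · rw [Prod.ext_iff] at heq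
            exact le_of_eq heq.1.symm
          · exact hpw.1 _ hmem
        have hminus : (max p.1 p.2 + 1, (-1 : Int)) ∈ ranges.flatMap pvEvt := by
          rw [List.mem_flatMap]
          exact ⟨p, hp, by simp [pvEvt]⟩
        have hxM : x < M := by
          have hb : max p.1 p.2 + 1 ≤ M := hcoordM _ hminus
          omega
        refine ⟨⟨by omega, hxM⟩, ?_⟩
        have hcnt : d0 + pvCnt rest x = pvCnt ((c0, d0) :: rest) x := by
          unfold pvCnt
          simp [show c0 ≤ x by omega]
        rw [hcnt, pv_cnt_perm hperm, pv_cnt_events]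
        have : 0 < ranges.countP (fun p => decide (min p.1 p.2 ≤ x ∧ x ≤ max p.1 p.2)) :=
          List.countP_pos_iff.mpr ⟨p, hp, decide_eq_true ⟨hq1, hq2⟩⟩
        exact_mod_cast this
    rw [hsetEq]

-- ===== VERDICT (by name: the statement is the Claim_ definition above) =====
theorem sum_unique_months_py_spec : Claim_equal_sum_unique_months_py := by
  intro ranges _
  unfold Spec_sum_unique_months_py
  rw [pv_A_card, pv_B_card]
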